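-- pv_equiv track=rewrite | github.com/manuelburger/ml4hc-fs21 | project3/data_representation.py | do_concatenate_sentences
-- ===== SOURCE A (Python) =====
-- def do_concatenate_sentences(X, window_size, normalized=True):
--     """
--     Concatenates sentences (represented as a string or list of words
--     - not vectors) into a larger context.
--     @param X: List of sentences (as lists of words if normalized=True
--               or 1 string if normalized=False)
--     @param window_size: Size of context
--     @param normalized: Whether the sentences are normalized (preprocessed and
--            represented as a list of words)
--     @return: List of concatenated sentences
--     """
--     reach = window_size // 2
--     n = len(X)
--
--     X_cat = []
--     for ii in range(n):
--         if normalized: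
--             context = []
--             for jj in range(max(0, ii - reach), min(n, ii + reach + 1)):
--                 context.extend(X[jj])
--         else:
--             context = ''
--             for jj in range(max(0, ii - reach), min(n, ii + reach + 1)):
--                 context += X[jj][0]
--         X_cat.append(context)
--
--     return X_cat
-- ===== SOURCE B (Python) =====
-- def do_concatenate_sentences(X, window_size, normalized=True):
--     """Prefix-offset re-implementation: flatten everything once, build a
--     cumulative offset table, then emit each context as a single slice."""
--     reach = window_size // 2
--     n = len(X)
--     if normalized:
--         flat = [w for s in X for w in s]
--         off = [0]
--         for s in X:
--             off.append(off[-1] + len(s))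
--     else:
--         flat = ''.join(s[0] for s in X)
--         off = [0]
--         for s in X:
--             off.append(off[-1] + len(s[0]))
--     return [flat[off[min(n, max(0, ii - reach))]:off[max(0, min(n, ii + reach + 1))]]
--             for ii in range(n)]
-- ===== Notes on version B (the rewrite author's own statement) =====
-- stated objective: alternative
-- what changed: Instead of re-scanning and concatenating the window per index (repeated extend over each window), B flattens all sentences once, builds a cumulative offset table, and emits each context as a single slice flat[off[lo]:off[hi]].
-- outside the precondition, e.g. on do_concatenate_sentences([['ab'], ['cd']], 2, False): A returns ['abcd', 'abcd'], B returns ['abcd', 'abcd']; on do_concatenate_sentences([[], ['c']], -4, False): A returns ['', ''], B raises IndexError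
import Mathlib
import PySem

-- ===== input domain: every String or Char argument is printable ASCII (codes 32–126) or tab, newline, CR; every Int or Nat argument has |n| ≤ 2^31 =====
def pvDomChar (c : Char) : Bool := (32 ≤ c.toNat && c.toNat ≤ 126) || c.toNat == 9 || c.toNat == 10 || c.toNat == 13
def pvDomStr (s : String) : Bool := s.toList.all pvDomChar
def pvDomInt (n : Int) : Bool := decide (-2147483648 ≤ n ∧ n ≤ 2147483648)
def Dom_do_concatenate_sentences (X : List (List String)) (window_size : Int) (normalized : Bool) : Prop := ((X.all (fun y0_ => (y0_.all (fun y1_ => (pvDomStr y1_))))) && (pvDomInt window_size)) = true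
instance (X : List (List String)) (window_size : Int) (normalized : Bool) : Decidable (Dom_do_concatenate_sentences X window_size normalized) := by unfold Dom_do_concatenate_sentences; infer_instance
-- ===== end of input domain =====

-- B builds the output by one flatten pass + cumulative-offset table + one slice per index,
-- instead of A's per-index window re-concatenation; objective: alternative decomposition.
-- On normalized=False Python returns a list of plain strings (not of the declared Lean
-- return type List (List String)); both ports model that branch by wrapping the
-- concatenated string in a singleton list, but the claim covers normalized=True only (Pre_).

-- ===== PORT A =====
def do_concatenate_sentences (X : List (List String)) (window_size : Int) (normalized : Bool) : List (List String) :=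
  let reach : Int := PySem.Int.floordiv window_size 2
  let n : Int := X.length
  (PySem.List.pyRange 0 n 1).foldl
    (fun X_cat ii =>
      let context : List String :=
        if normalized then
          (PySem.List.pyRange (max 0 (ii - reach)) (min n (ii + reach + 1)) 1).foldl
            (fun c jj => c ++ PySem.List.pyGetD X jj []) []
        else
          -- Python builds a str from X[jj][0]; wrapped in a singleton list to fit the
          -- declared type (outside Pre_; X[jj][0]'s IndexError on empty X[jj] not modeled)
          [(PySem.List.pyRange (max 0 (ii - reach)) (min n (ii + reach + 1)) 1).foldl
            (fun c jj => c ++ PySem.List.pyGetD (PySem.List.pyGetD X jj []) 0 "") ""]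
      X_cat ++ [context]) []

-- ===== PORT B =====
def do_concatenate_sentences_alt (X : List (List String)) (window_size : Int) (normalized : Bool) : List (List String) :=
  let reach : Int := PySem.Int.floordiv window_size 2
  let n : Int := X.length
  if normalized then
    let flat : List String := X.flatMap (fun s => s)          -- [w for s in X for w in s]
    let off : List Int := X.foldl
      (fun o s => o ++ [PySem.List.pyGetD o (-1) 0 + (s.length : Int)]) [0]
    (PySem.List.pyRange 0 n 1).map (fun ii =>
      PySem.List.slice flat
        (some (PySem.List.pyGetD off (min n (max 0 (ii - reach))) 0))
        (some (PySem.List.pyGetD off (max 0 (min n (ii + reach + 1))) 0)))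
  else
    -- non-normalized branch (outside Pre_): big string + char offsets, each context a
    -- substring, wrapped in a singleton list to fit the declared type
    let flat : String := PySem.Str.join "" (X.map (fun s => PySem.List.pyGetD s 0 ""))
    let off : List Int := X.foldl
      (fun o s => o ++ [PySem.List.pyGetD o (-1) 0 + ((PySem.List.pyGetD s 0 "").length : Int)]) [0]
    (PySem.List.pyRange 0 n 1).map (fun ii =>
      [PySem.Str.slice flat
        (some (PySem.List.pyGetD off (min n (max 0 (ii - reach))) 0))
        (some (PySem.List.pyGetD off (max 0 (min n (ii + reach + 1))) 0))])

-- ===== PRECONDITION & SPEC =====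
-- Pre_ excludes normalized=False, where A returns a list of plain strings — not a value of
-- the declared return type List (List String) — and raises IndexError whenever a sentence
-- in a window is the empty list.
def Pre_do_concatenate_sentences (X : List (List String)) (window_size : Int) (normalized : Bool) : Prop :=
  normalized = true
instance (X : List (List String)) (window_size : Int) (normalized : Bool) : Decidable (Pre_do_concatenate_sentences X window_size normalized) := by unfold Pre_do_concatenate_sentences; infer_instance

def pvWitness_do_concatenate_sentences : List (List String) × Int × Bool :=
  ([["a", "b"], ["c"], ["d", "e"]], 2, true)

def Spec_do_concatenate_sentences (X : List (List String)) (window_size : Int) (normalized : Bool) (out : List (List String)) : Prop := out = do_concatenate_sentences_alt X window_size normalized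
instance (X : List (List String)) (window_size : Int) (normalized : Bool) (out : List (List String)) : Decidable (Spec_do_concatenate_sentences X window_size normalized out) := by unfold Spec_do_concatenate_sentences; infer_instance

-- ===== CLAIM (what is proved, stated in full; the proofs are below) =====
def Claim_equal_do_concatenate_sentences : Prop := ∀ (X : List (List String)) (window_size : Int) (normalized : Bool), Dom_do_concatenate_sentences X window_size normalized → Pre_do_concatenate_sentences X window_size normalized → Spec_do_concatenate_sentences X window_size normalized (do_concatenate_sentences X window_size normalized)

-- ===== LEMMAS AND PROOFS =====

/-- cumulative offset: total length of the first `k` sentences -/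
def pvOff (X : List (List String)) (k : Nat) : Nat :=
  ((X.take k).map List.length).sum

theorem pvOff_split (X : List (List String)) {a b : Nat} (h : a ≤ b) :
    pvOff X b = pvOff X a + pvOff (X.drop a) (b - a) := by
  unfold pvOff
  rw [show b = a + (b - a) by omega, List.take_add, List.map_append, List.sum_append]
  simp

theorem pvOff_mono (X : List (List String)) {a b : Nat} (h : a ≤ b) :
    pvOff X a ≤ pvOff X b := by
  rw [pvOff_split X h]; omega

/-- the offset-table fold produces exactly the prefix sums -/
theorem pvOffList_fold (X : List (List String)) : ∀ (o : List Int) (x : Int),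
    X.foldl (fun o s => o ++ [PySem.List.pyGetD o (-1) 0 + (s.length : Int)]) (o ++ [x])
      = (o ++ [x]) ++ (List.range X.length).map (fun k => x + (pvOff X (k + 1) : Int)) := by
  induction X with
  | nil => simp
  | cons s X ih =>
    intro o x
    simp only [List.foldl_cons, PySem.List.pyGetD_neg_one_append_singleton]
    rw [ih (o ++ [x]) (x + (s.length : Int))]
    simp only [List.length_cons, List.range_succ_eq_map, List.map_cons, List.map_map]
    have h0 : pvOff (s :: X) 1 = s.length := by simp [pvOff]
    have hs : ∀ k : Nat, pvOff (s :: X) (k + 2) = s.length + pvOff X (k + 1) := by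
      intro k; simp [pvOff]
    simp [h0, Function.comp, hs, add_assoc]

theorem pvOffList_eq (X : List (List String)) :
    X.foldl (fun o s => o ++ [PySem.List.pyGetD o (-1) 0 + (s.length : Int)]) [0]
      = (List.range (X.length + 1)).map (fun k => (pvOff X k : Int)) := by
  have := pvOffList_fold X [] 0
  simp only [List.nil_append] at this
  rw [this, List.range_succ_eq_map]
  simp [pvOff, Function.comp]

theorem pvOffList_get (X : List (List String)) (k : Nat) (hk : k ≤ X.length) :
    PySem.List.pyGetD
      (X.foldl (fun o s => o ++ [PySem.List.pyGetD o (-1) 0 + (s.length : Int)]) [0])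
      (k : Int) 0 = (pvOff X k : Int) := by
  rw [pvOffList_eq, PySem.List.pyGetD_natCast]
  rw [List.getD_eq_getElem?_getD, List.getElem?_map, List.getElem?_range (by omega)]
  simp

/-- A's inner window loop computes the flatten of the window of sentences -/
theorem pvAwin (X : List (List String)) : ∀ (m : Nat) (a b : Int) (c : List String),
    0 ≤ a → b ≤ (X.length : Int) → m = (b - a).toNat →
    (PySem.List.pyRange a b 1).foldl (fun c jj => c ++ PySem.List.pyGetD X jj []) c
      = c ++ ((X.drop a.toNat).take (b - a).toNat).flatten := by
  intro m
  induction m with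
  | zero =>
    intro a b c ha hb hm
    rw [PySem.List.pyRange_one_eq_nil (by omega)]
    simp [show (b - a).toNat = 0 by omega]
  | succ m ih =>
    intro a b c ha hb hm
    rw [PySem.List.pyRange_one_cons (by omega)]
    simp only [List.foldl_cons]
    have haN : a.toNat < X.length := by omega
    have hga : PySem.List.pyGetD X a [] = X[a.toNat] := by
      exact PySem.List.pyGetD_eq_getElem (xs := X) (i := a) (d := []) ha (by omega)
    rw [hga, ih (a + 1) b (c ++ X[a.toNat]) (by omega) hb (by omega)]
    rw [show (a + 1).toNat = a.toNat + 1 by omega,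
        show (b - a).toNat = (b - (a + 1)).toNat + 1 by omega,
        List.drop_eq_getElem_cons haN, List.take_succ_cons, List.flatten_cons,
        List.append_assoc]

theorem pvFlattenTake (X : List (List String)) : ∀ (m : Nat),
    X.flatten.take (pvOff X m) = (X.take m).flatten := by
  induction X with
  | nil => intro m; simp [pvOff]
  | cons s X ih =>
    intro m
    cases m with
    | zero => simp [pvOff]
    | succ m =>
      have : pvOff (s :: X) (m + 1) = s.length + pvOff X m := by simp [pvOff]
      simp [this, List.take_append, ih m]

theorem pvFlattenDrop (X : List (List String)) : ∀ (m : Nat),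
    X.flatten.drop (pvOff X m) = (X.drop m).flatten := by
  induction X with
  | nil => intro m; simp [pvOff]
  | cons s X ih =>
    intro m
    cases m with
    | zero => simp [pvOff]
    | succ m =>
      have : pvOff (s :: X) (m + 1) = s.length + pvOff X m := by simp [pvOff]
      simp [this, List.drop_append, ih m]

/-- the slice between two offsets is the flatten of the window -/
theorem pvBslice (X : List (List String)) (a b : Nat) (hab : a ≤ b) (hb : b ≤ X.length) :
    (X.flatten.drop (pvOff X a)).take (pvOff X b - pvOff X a)
      = ((X.drop a).take (b - a)).flatten := by
  rw [pvFlattenDrop X a, pvOff_split X hab, Nat.add_sub_cancel_left]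
  exact pvFlattenTake (X.drop a) (b - a)

/-- per-index equality of A's window fold and B's offset slice -/
theorem pvWinEq (X : List (List String)) (reach ii : Int)
    (h0 : 0 ≤ ii) (hn : ii < (X.length : Int)) :
    (PySem.List.pyRange (max 0 (ii - reach)) (min (X.length : Int) (ii + reach + 1)) 1).foldl
        (fun c jj => c ++ PySem.List.pyGetD X jj []) []
      = PySem.List.slice (X.flatMap (fun s => s))
          (some (PySem.List.pyGetD
            (X.foldl (fun o s => o ++ [PySem.List.pyGetD o (-1) 0 + (s.length : Int)]) [0])
            (min (X.length : Int) (max 0 (ii - reach))) 0))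
          (some (PySem.List.pyGetD
            (X.foldl (fun o s => o ++ [PySem.List.pyGetD o (-1) 0 + (s.length : Int)]) [0])
            (max 0 (min (X.length : Int) (ii + reach + 1))) 0)) := by
  set n : Int := (X.length : Int) with hnn
  have hflat : X.flatMap (fun s => s) = X.flatten := by simp
  -- B's clamped indices as naturals
  set loI : Int := min n (max 0 (ii - reach)) with hloI
  set hiI : Int := max 0 (min n (ii + reach + 1)) with hhiI
  have hlo0 : 0 ≤ loI := by omega
  have hlon : loI ≤ n := by omega
  have hhi0 : 0 ≤ hiI := by omega
  have hhin : hiI ≤ n := by omega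
  have hloC : loI = ((loI.toNat : Nat) : Int) := by omega
  have hhiC : hiI = ((hiI.toNat : Nat) : Int) := by omega
  rw [hflat, hloC, hhiC,
      pvOffList_get X loI.toNat (by omega), pvOffList_get X hiI.toNat (by omega),
      PySem.List.slice_natCast]
  by_cases hle : max 0 (ii - reach) < min n (ii + reach + 1)
  · -- non-empty window: B's clamps are the identity
    have hlo : loI = max 0 (ii - reach) := by omega
    have hhi : hiI = min n (ii + reach + 1) := by omega
    rw [pvAwin X (min n (ii + reach + 1) - max 0 (ii - reach)).toNat
          (max 0 (ii - reach)) (min n (ii + reach + 1)) [] (by omega) (by omega) rfl]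
    rw [List.nil_append, ← hlo, ← hhi, hloC, hhiC]
    have : ((hiI.toNat : Int) - (loI.toNat : Int)).toNat = hiI.toNat - loI.toNat := by omega
    rw [this]
    exact (pvBslice X loI.toNat hiI.toNat (by omega) (by omega)).symm
  · -- empty window on both sides
    rw [PySem.List.pyRange_one_eq_nil (by omega)]
    have : hiI ≤ loI := by omega
    have hmono : pvOff X hiI.toNat ≤ pvOff X loI.toNat := pvOff_mono X (by omega)
    simp [List.foldl_nil, show pvOff X hiI.toNat - pvOff X loI.toNat = 0 by omega]

-- ===== VERDICT (by name: the statement is the Claim_ definition above) =====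
theorem do_concatenate_sentences_spec : Claim_equal_do_concatenate_sentences := by
  intro X window_size normalized _ hpre
  unfold Pre_do_concatenate_sentences at hpre
  subst hpre
  unfold Spec_do_concatenate_sentences do_concatenate_sentences do_concatenate_sentences_alt
  simp only [if_true]
  rw [PySem.List.foldl_append_singleton_eq_map]
  refine List.map_congr_left ?_
  intro ii hii
  rw [PySem.List.mem_pyRange_one] at hii
  exact pvWinEq X (PySem.Int.floordiv window_size 2) ii hii.1 hii.2
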